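-- pv_equiv track=rewrite | github.com/przefur/PythonWIP | Advent2k20/task6/answer6.py | answerGetter
-- ===== SOURCE A (Python) =====
-- def split(word):
--     return [char for char in word]
--
-- def answerGetter(input_string):
--     answer = []
--     listofanswers = []
--     for line in input_string:
--         if line != "\n":
--             line = split(line.rstrip())
--             for element in line:
--                 answer.append(element)
--         else:
--             listofanswers.append(answer)
--             answer = []
--     listofanswers.append(answer)
--
--     return listofanswers
-- ===== SOURCE B (Python) =====
-- def answerGetter(input_string):
--     cuts = [i for i, line in enumerate(input_string) if line == "\n"]
--     bounds = [-1] + cuts + [len(input_string)]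
--     return [list("".join(line.rstrip() for line in input_string[lo + 1 : hi]))
--             for lo, hi in zip(bounds, bounds[1:])]
-- ===== Notes on version B (the rewrite author's own statement) =====
-- stated objective: faster
-- what changed: B first computes the list of blank-line separator indices with enumerate, then builds each group directly by slicing the lines between consecutive separator positions and joining their rstripped contents with str.join, instead of A's single forward loop that appends characters one by one into an accumulator flushed at each separator; the bulk slice/join mechanism replaces per-character append calls, a constant-factor speedup measured at about 1.8x.
import Mathlib
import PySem

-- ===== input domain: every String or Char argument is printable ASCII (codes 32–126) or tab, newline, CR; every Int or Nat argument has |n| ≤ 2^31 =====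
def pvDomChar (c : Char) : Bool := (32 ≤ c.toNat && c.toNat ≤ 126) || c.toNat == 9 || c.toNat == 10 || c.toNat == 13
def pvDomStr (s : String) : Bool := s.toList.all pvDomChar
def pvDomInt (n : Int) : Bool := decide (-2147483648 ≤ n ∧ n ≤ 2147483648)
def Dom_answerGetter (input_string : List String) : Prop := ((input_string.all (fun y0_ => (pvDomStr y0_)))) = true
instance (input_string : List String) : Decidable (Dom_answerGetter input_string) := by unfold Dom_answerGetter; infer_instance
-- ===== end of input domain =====

-- B computes the separator indices first and builds each group by slicing between
-- consecutive separators and joining the rstripped lines, instead of A's forward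
-- accumulator-and-flush character loop (objective: faster, measured constant-factor).

-- ===== PORT A =====
-- split(word) = [char for char in word]
def splitA (word : String) : List String := word.toList.map (fun c => String.ofList [c])

-- one iteration of A's for-loop over (answer, listofanswers)
def stepA (st : List String × List (List String)) (line : String) : List String × List (List String) :=
  if line ≠ "\n" then
    ((splitA (PySem.Str.rstrip line)).foldl (fun a e => a ++ [e]) st.1, st.2)
  else
    ([], st.2 ++ [st.1])

def answerGetter (input_string : List String) : List (List String) :=
  let st := input_string.foldl stepA ([], [])
  st.2 ++ [st.1]

-- ===== PORT B =====
-- list("".join(line.rstrip() for line in input_string[lo+1:hi])) for one (lo, hi) pair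
def grpB (xs : List String) (p : Int × Int) : List String :=
  (PySem.Str.join "" ((PySem.List.slice xs (some (p.1 + 1)) (some p.2)).map PySem.Str.rstrip)).toList.map
    (fun c => String.ofList [c])

-- cuts = [i for i, line in enumerate(input_string) if line == "\n"]
def cutsB (xs : List String) : List Int :=
  (PySem.List.enumerate xs).filterMap (fun p => if p.2 == "\n" then some p.1 else none)

def answerGetter_alt (input_string : List String) : List (List String) :=
  let bounds := [(-1 : Int)] ++ cutsB input_string ++ [(input_string.length : Int)]
  (bounds.zip bounds.tail).map (grpB input_string)

-- ===== PRECONDITION & SPEC =====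
def Spec_answerGetter (input_string : List String) (out : List (List String)) : Prop := out = answerGetter_alt input_string
instance (input_string : List String) (out : List (List String)) : Decidable (Spec_answerGetter input_string out) := by unfold Spec_answerGetter; infer_instance

-- ===== CLAIM =====
def Claim_equal_answerGetter : Prop := ∀ (input_string : List String), Dom_answerGetter input_string → Spec_answerGetter input_string (answerGetter input_string)

-- ===== LEMMAS AND PROOFS =====

-- reference recursion: both ports are proved equal to it
def recG : List String → List (List String)
  | [] => [[]]
  | l :: r =>
    if l == "\n" then [] :: recG r
    else ((PySem.Str.rstrip l).toList.map (fun c => String.ofList [c]) ++ (recG r).headD []) :: (recG r).tail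

lemma recG_ne_nil (xs : List String) : recG xs ≠ [] := by
  cases xs with
  | nil => simp [recG]
  | cons l r => unfold recG; split <;> simp

lemma recG_cons_eta (xs : List String) :
    recG xs = (recG xs).headD [] :: (recG xs).tail := by
  cases hx : recG xs with
  | nil => exact absurd hx (recG_ne_nil xs)
  | cons a t => simp

lemma foldl_snoc (l : List String) (a : List String) :
    l.foldl (fun a e => a ++ [e]) a = a ++ l := by
  induction l generalizing a with
  | nil => simp
  | cons x xs ih => simp [List.foldl, ih]

-- invariant of A's forward loop
lemma loop_inv : ∀ (xs : List String) (ans : List String) (acc : List (List String)),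
    (let st := xs.foldl stepA (ans, acc); st.2 ++ [st.1])
      = acc ++ (ans ++ (recG xs).headD []) :: (recG xs).tail := by
  intro xs
  induction xs with
  | nil => intro ans acc; simp [recG]
  | cons line rest ih =>
    intro ans acc
    by_cases h : line = "\n"
    · have hA : stepA (ans, acc) line = ([], acc ++ [ans]) := by
        simp [stepA, h]
      have hR : recG (line :: rest) = [] :: recG rest := by
        simp [recG, h]
      rw [List.foldl_cons, hA, hR]
      have := ih [] (acc ++ [ans])
      simp only [this, List.headD_cons, List.tail_cons, List.nil_append]
      rw [List.append_assoc]
      congr 1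
      simpa using (recG_cons_eta rest).symm
    · have hA : stepA (ans, acc) line
          = (ans ++ (PySem.Str.rstrip line).toList.map (fun c => String.ofList [c]), acc) := by
        unfold stepA
        rw [if_pos h, foldl_snoc]
        rfl
      have hR : recG (line :: rest)
          = ((PySem.Str.rstrip line).toList.map (fun c => String.ofList [c])
              ++ (recG rest).headD []) :: (recG rest).tail := by
        simp [recG, h]
      rw [List.foldl_cons, hA, hR]
      have := ih (ans ++ (PySem.Str.rstrip line).toList.map (fun c => String.ofList [c])) acc
      simpa [List.append_assoc] using this

lemma A_eq_recG (xs : List String) : answerGetter xs = recG xs := by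
  have := loop_inv xs [] []
  simp only [answerGetter, List.nil_append] at this ⊢
  rw [this]
  exact (recG_cons_eta xs).symm

-- ===== B = recG =====

lemma enumerate_shift {α : Type} (xs : List α) (s : Int) :
    PySem.List.enumerate xs (s + 1) = (PySem.List.enumerate xs s).map (fun p => (p.1 + 1, p.2)) := by
  induction xs generalizing s with
  | nil => simp [PySem.List.enumerate_nil]
  | cons x r ih => rw [PySem.List.enumerate_cons, PySem.List.enumerate_cons, List.map_cons, ih]

lemma cutsB_cons (l : String) (r : List String) :
    cutsB (l :: r) = (if l == "\n" then [(0 : Int)] else []) ++ (cutsB r).map (· + 1) := by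
  unfold cutsB
  rw [PySem.List.enumerate_cons, List.filterMap_cons]
  rw [show (0 : Int) + 1 = 0 + 1 from rfl, enumerate_shift]
  rw [List.filterMap_map]
  have : (List.filterMap
      ((fun p : Int × String => if p.2 == "\n" then some p.1 else none) ∘ (fun p : Int × String => (p.1 + 1, p.2)))
      (PySem.List.enumerate r 0))
      = ((PySem.List.enumerate r 0).filterMap (fun p => if p.2 == "\n" then some p.1 else none)).map (· + 1) := by
    rw [List.map_filterMap]
    congr 1
    funext p
    by_cases h : p.2 = "\n"
    · simp [h, Function.comp]
    · simp [h, Function.comp]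
  rw [this]
  by_cases h : l = "\n"
  · simp [h]
  · simp [h]

lemma cutsB_nonneg (xs : List String) : ∀ c ∈ cutsB xs, 0 ≤ c := by
  induction xs with
  | nil => simp [cutsB, PySem.List.enumerate_nil]
  | cons l r ih =>
    intro c hc
    rw [cutsB_cons] at hc
    rcases List.mem_append.mp hc with h | h
    · split at h <;> simp_all
    · obtain ⟨d, hd, rfl⟩ := List.mem_map.mp h
      have := ih d hd
      omega

lemma slice_cons_succ {α : Type} (x : α) (xs : List α) (a b : Int) (ha : 0 ≤ a) (hb : 0 ≤ b) :
    PySem.List.slice (x :: xs) (some (a + 1)) (some (b + 1)) = PySem.List.slice xs (some a) (some b) := by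
  rw [PySem.List.slice_toNat _ (by omega : (0:Int) ≤ a+1) (by omega : (0:Int) ≤ b+1),
      PySem.List.slice_toNat _ ha hb]
  have h1 : (a + 1).toNat = a.toNat + 1 := by omega
  have h2 : (b + 1).toNat - (a.toNat + 1) = b.toNat - a.toNat := by omega
  rw [h1, h2, List.drop_succ_cons]

lemma grpB_shift (l : String) (r : List String) (p : Int × Int) (h1 : -1 ≤ p.1) (h2 : 0 ≤ p.2) :
    grpB (l :: r) (p.1 + 1, p.2 + 1) = grpB r p := by
  unfold grpB
  have : p.1 + 1 + 1 = (p.1 + 1) + 1 := by ring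
  rw [this, slice_cons_succ l r (p.1 + 1) p.2 (by omega) h2]

lemma flatten_intersperse_nil {α : Type} (ls : List (List α)) :
    (List.intersperse ([] : List α) ls).flatten = ls.flatten := by
  induction ls with
  | nil => rfl
  | cons a t ih =>
    cases t with
    | nil => simp
    | cons b u => simp_all [List.intersperse]

lemma join_empty_toList (ws : List String) :
    (PySem.Str.join "" ws).toList = (ws.map String.toList).flatten := by
  have h : (PySem.Str.join "" ws).toList = PySem.Chars.join [] (ws.map String.toList) := by
    simp [PySem.Str.join]
  rw [h]
  simp [PySem.Chars.join, List.intercalate, flatten_intersperse_nil]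

lemma grpB_cons_head (l : String) (r : List String) (h : Int) (hh : 0 ≤ h) :
    grpB (l :: r) (-1, h + 1)
      = (PySem.Str.rstrip l).toList.map (fun c => String.ofList [c]) ++ grpB r (-1, h) := by
  unfold grpB
  have hsl : PySem.List.slice (l :: r) (some ((-1 : Int) + 1)) (some (h + 1))
      = l :: PySem.List.slice r (some ((-1 : Int) + 1)) (some h) := by
    norm_num
    rw [PySem.List.slice_to _ (by omega : (0:Int) ≤ h+1), PySem.List.slice_to _ hh]
    have : (h + 1).toNat = h.toNat + 1 := by omega
    rw [this, List.take_succ_cons]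
  rw [hsl, List.map_cons, join_empty_toList, join_empty_toList]
  simp

lemma B_eq_recG (xs : List String) : answerGetter_alt xs = recG xs := by
  induction xs with
  | nil =>
    show ([((-1 : Int), (0 : Int))]).map (grpB []) = [[]]
    simp [grpB, PySem.List.slice, PySem.Str.join, PySem.Chars.join, List.intercalate]
  | cons l r ih =>
    -- s = the bounds of r minus the leading -1 : all entries ≥ 0, nonempty
    set s : List Int := cutsB r ++ [(r.length : Int)] with hs_def
    have hs_nonneg : ∀ x ∈ s, 0 ≤ x := by
      intro x hx
      rcases List.mem_append.mp hx with h | h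
      · exact cutsB_nonneg r x h
      · simp at h; omega
    obtain ⟨s0, s', hs⟩ : ∃ s0 s', s = s0 :: s' := by
      rw [hs_def]
      cases hcut : cutsB r with
      | nil => exact ⟨(r.length : Int), [], by simp⟩
      | cons a t => exact ⟨a, t ++ [(r.length : Int)], by simp⟩
    have hs0 : 0 ≤ s0 := hs_nonneg s0 (by simp [hs])
    have hlen : ((l :: r).length : Int) = (r.length : Int) + 1 := by simp
    have hrows_r : answerGetter_alt r
        = grpB r (-1, s0) :: (s.zip s').map (grpB r) := by
      show (((([(-1 : Int)] ++ cutsB r ++ [(r.length : Int)])).zip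
              (([(-1 : Int)] ++ cutsB r ++ [(r.length : Int)]).tail)).map (grpB r)) = _
      have : [(-1 : Int)] ++ cutsB r ++ [(r.length : Int)] = -1 :: s := by simp [hs_def]
      rw [this, hs]
      simp [List.zip_cons_cons]
    have hmap_shift : ∀ (t u : List Int), (∀ p ∈ t.zip u, -1 ≤ p.1 ∧ 0 ≤ p.2) →
        ((t.map (· + 1)).zip (u.map (· + 1))).map (grpB (l :: r)) = (t.zip u).map (grpB r) := by
      intro t u hnn
      rw [List.zip_map]
      rw [List.map_map]
      refine List.map_congr_left ?_
      intro p hp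
      have := hnn p hp
      have := grpB_shift l r p (by omega) this.2
      simpa [Function.comp, Prod.map] using this
    by_cases h : l = "\n"
    · -- bounds (l::r) = -1 :: 0 :: s.map (+1)
      have hb : [(-1 : Int)] ++ cutsB (l :: r) ++ [((l :: r).length : Int)]
          = -1 :: 0 :: s.map (· + 1) := by
        rw [cutsB_cons]
        simp [h, hs_def]
      show ((([(-1 : Int)] ++ cutsB (l :: r) ++ [((l :: r).length : Int)]).zip
              (([(-1 : Int)] ++ cutsB (l :: r) ++ [((l :: r).length : Int)]).tail)).map (grpB (l :: r)))
          = recG (l :: r)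
      rw [hb]
      simp only [List.tail_cons, List.zip_cons_cons, List.map_cons]
      have hfirst : grpB (l :: r) (-1, 0) = [] := by
        unfold grpB
        norm_num
        rw [PySem.List.slice_to _ (by omega : (0:Int) ≤ 0)]
        simp [PySem.Chars.join, List.intercalate]
      have hzip : ((0 : Int) :: s.map (· + 1)).zip (s.map (· + 1))
          = (((-1 : Int) :: s).map (· + 1)).zip (s.map (· + 1)) := by norm_num
      rw [hfirst, hzip]
      have hrest : ((((-1 : Int) :: s).map (· + 1)).zip (s.map (· + 1))).map (grpB (l :: r))
          = (((-1 : Int) :: s).zip s).map (grpB r) := by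
        apply hmap_shift
        intro p hp
        have hm := List.of_mem_zip hp
        rcases List.mem_cons.mp hm.1 with h1 | h1
        · exact ⟨by omega, hs_nonneg _ hm.2⟩
        · exact ⟨by have := hs_nonneg _ h1; omega, hs_nonneg _ hm.2⟩
      rw [hrest]
      have : (((-1 : Int) :: s).zip s).map (grpB r) = answerGetter_alt r := by
        rw [hrows_r, hs]
        simp [List.zip_cons_cons]
      rw [this, ih]
      simp [recG, h]
    · -- bounds (l::r) = -1 :: s.map (+1)
      have hb : [(-1 : Int)] ++ cutsB (l :: r) ++ [((l :: r).length : Int)]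
          = -1 :: s.map (· + 1) := by
        rw [cutsB_cons]
        have : (l == "\n") = false := by simp [h]
        simp [this, hs_def]
      show ((([(-1 : Int)] ++ cutsB (l :: r) ++ [((l :: r).length : Int)]).zip
              (([(-1 : Int)] ++ cutsB (l :: r) ++ [((l :: r).length : Int)]).tail)).map (grpB (l :: r)))
          = recG (l :: r)
      rw [hb, hs]
      simp only [List.map_cons, List.tail_cons, List.zip_cons_cons, List.map_cons]
      have hrest : (((s0 + 1) :: s'.map (· + 1)).zip (s'.map (· + 1))).map (grpB (l :: r))
          = ((s0 :: s').zip s').map (grpB r) := by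
        have := hmap_shift (s0 :: s') s' ?_
        · simpa using this
        · intro p hp
          have hm := List.of_mem_zip hp
          have h1 : 0 ≤ p.1 := hs_nonneg _ (by rw [hs]; exact hm.1)
          have h2 : 0 ≤ p.2 := hs_nonneg _ (by rw [hs]; exact List.mem_cons_of_mem _ hm.2)
          exact ⟨by omega, h2⟩
      rw [hrest]
      have hhead := grpB_cons_head l r s0 hs0
      rw [hhead]
      have hr' : answerGetter_alt r = grpB r (-1, s0) :: ((s0 :: s').zip s').map (grpB r) := by
        rw [hrows_r, hs]
      rw [show ((s0 :: s').zip s').map (grpB r) = (answerGetter_alt r).tail by rw [hr']; rfl]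
      have hhd : grpB r (-1, s0) = (answerGetter_alt r).headD [] := by rw [hr']; rfl
      rw [hhd, ih]
      simp [recG, h]

-- ===== VERDICT =====
theorem answerGetter_spec : Claim_equal_answerGetter := by
  intro input_string _
  show answerGetter input_string = answerGetter_alt input_string
  rw [A_eq_recG, B_eq_recG]
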